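-- pv_equiv track=rewrite | github.com/ethanzombie06/UWE_Systems_development_GVCC_Case_ | src/main.py | find_milestone_crossings
-- ===== SOURCE A (Python) =====
-- def find_milestone_crossings(max_remaining_lengths):
--     thresholds = [13000, 8000, 6000]
--     crossings = {}
--
--     for threshold in thresholds:
--         for index, length in enumerate(max_remaining_lengths, start=1):
--             if length < threshold and (index == 1 or max_remaining_lengths[index - 2] >= threshold):
--                 crossings[threshold] = index
--                 break
--
--     return crossings
-- ===== SOURCE B (Python) =====
-- def find_milestone_crossings(max_remaining_lengths):
--     thresholds = [13000, 8000, 6000]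
--     found = {}
--     prev = None
--     for index, length in enumerate(max_remaining_lengths, start=1):
--         for t in thresholds:
--             if t not in found and length < t and (prev is None or prev >= t):
--                 found[t] = index
--         prev = length
--     return {t: found[t] for t in thresholds if t in found}
-- ===== Notes on version B (the rewrite author's own statement) =====
-- stated objective: alternative
-- what changed: A scans the whole list once per threshold with an index lookup for the previous element; B makes a single pass tracking the previous length and the not-yet-recorded thresholds, then emits the result in threshold order.
import Mathlib
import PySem

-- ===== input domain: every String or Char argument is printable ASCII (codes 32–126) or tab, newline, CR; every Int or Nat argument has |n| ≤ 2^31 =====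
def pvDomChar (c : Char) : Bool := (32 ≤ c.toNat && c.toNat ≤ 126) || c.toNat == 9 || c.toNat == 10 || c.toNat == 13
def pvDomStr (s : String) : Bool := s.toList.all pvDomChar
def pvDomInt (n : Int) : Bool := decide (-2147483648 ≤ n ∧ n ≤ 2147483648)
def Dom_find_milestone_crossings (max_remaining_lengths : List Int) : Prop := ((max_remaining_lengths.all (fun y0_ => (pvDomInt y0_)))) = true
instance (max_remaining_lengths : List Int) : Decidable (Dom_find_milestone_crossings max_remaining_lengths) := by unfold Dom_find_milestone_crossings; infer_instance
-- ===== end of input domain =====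

-- B replaces A's three scans of the list (one per threshold) by a single pass that
-- tracks the previous element and the not-yet-recorded thresholds (objective: alternative decomposition).

-- ===== PORT A =====
-- 'max_remaining_lengths[index - 2] >= threshold' (only evaluated when index >= 2, so always in range)
def pvPrevGE (full : List Int) (i t : Int) : Bool :=
  match PySem.List.pyGet? full (i - 2) with
  | some p => decide (t ≤ p)
  | none => false

-- the inner 'for index, length in enumerate(..., start=1): … break' loop for one threshold
def pvAGo (full : List Int) (t : Int) (i : Int) : List Int → Option Int
  | [] => none
  | x :: rest =>
    if x < t ∧ (i = 1 ∨ pvPrevGE full i t = true) then some i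
    else pvAGo full t (i + 1) rest

def find_milestone_crossings (max_remaining_lengths : List Int) : List (Int × Int) :=
  (([13000, 8000, 6000] : List Int).foldl
    (fun (crossings : PySem.Dict Int Int) t =>
      match pvAGo max_remaining_lengths t 1 max_remaining_lengths with
      | some i => crossings.insert t i
      | none => crossings)
    PySem.Dict.empty).items

-- ===== PORT B =====
-- 'prev is None or prev >= t'
def pvPrevOK (prev : Option Int) (t : Int) : Bool :=
  match prev with
  | none => true
  | some p => decide (t ≤ p)

-- the inner 'for t in thresholds: …' loop of B
def pvBInner (found : PySem.Dict Int Int) (idx x : Int) (prev : Option Int) : PySem.Dict Int Int :=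
  ([13000, 8000, 6000] : List Int).foldl
    (fun f t =>
      if (f.get? t).isNone ∧ x < t ∧ pvPrevOK prev t = true then f.insert t idx else f)
    found

def find_milestone_crossings_alt (max_remaining_lengths : List Int) : List (Int × Int) :=
  let st := max_remaining_lengths.foldl
    (fun (s : Option Int × PySem.Dict Int Int × Int) x =>
      (some x, pvBInner s.2.1 s.2.2 x s.1, s.2.2 + 1))
    (none, PySem.Dict.empty, 1)
  ([13000, 8000, 6000] : List Int).filterMap
    (fun t => (st.2.1.get? t).map (fun i => (t, i)))

-- ===== PRECONDITION & SPEC =====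
def Spec_find_milestone_crossings (max_remaining_lengths : List Int) (out : List (Int × Int)) : Prop := out = find_milestone_crossings_alt max_remaining_lengths
instance (max_remaining_lengths : List Int) (out : List (Int × Int)) : Decidable (Spec_find_milestone_crossings max_remaining_lengths out) := by unfold Spec_find_milestone_crossings; infer_instance

-- ===== CLAIM (what is proved, stated in full; the proofs are below) =====
def Claim_equal_find_milestone_crossings : Prop := ∀ (max_remaining_lengths : List Int), Dom_find_milestone_crossings max_remaining_lengths → Spec_find_milestone_crossings max_remaining_lengths (find_milestone_crossings max_remaining_lengths)

-- ===== LEMMAS AND PROOFS =====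

-- common specification of both loops: first index ≥ i at which the length drops below t
def pvFC (t : Int) (prev : Option Int) (i : Int) : List Int → Option Int
  | [] => none
  | x :: r => if x < t ∧ pvPrevOK prev t = true then some i else pvFC t (some x) (i + 1) r

theorem pvAGo_eq_fc (t : Int) : ∀ (rest pre : List Int),
    pvAGo (pre ++ rest) t ((pre.length : Int) + 1) rest = pvFC t pre.getLast? ((pre.length : Int) + 1) rest := by
  intro rest
  induction rest with
  | nil => intro pre; rfl
  | cons x r ih =>
    intro pre
    have hcond : (((pre.length : Int) + 1 = 1) ∨ pvPrevGE (pre ++ x :: r) ((pre.length : Int) + 1) t = true)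
        ↔ pvPrevOK pre.getLast? t = true := by
      rcases List.eq_nil_or_concat pre with rfl | ⟨ys, a, rfl⟩
      · simp [pvPrevOK]
      · simp only [List.concat_eq_append]
        have hlen : ((ys ++ [a]).length : Int) + 1 - 2 = ((ys.length : Nat) : Int) := by
          simp only [List.length_append, List.length_cons, List.length_nil]
          push_cast
          ring
        have hne : ¬ (((ys ++ [a]).length : Int) + 1 = 1) := by
          simp only [List.length_append, List.length_cons, List.length_nil]
          push_cast
          omega
        have hidx : (ys ++ [a] ++ x :: r)[ys.length]? = some a := by
          rw [List.append_assoc, List.getElem?_append_right (le_refl ys.length)]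
          simp
        have hpg : pvPrevGE (ys ++ [a] ++ x :: r) (((ys ++ [a]).length : Int) + 1) t = decide (t ≤ a) := by
          unfold pvPrevGE
          rw [hlen, PySem.List.pyGet?_natCast, hidx]
        rw [hpg, List.getLast?_concat]
        constructor
        · rintro (h1 | h2)
          · exact absurd h1 hne
          · simp only [pvPrevOK, decide_eq_true_eq]
            exact of_decide_eq_true h2
        · intro h
          exact Or.inr (by simpa [pvPrevOK] using h)
    have hstep : pvAGo (pre ++ x :: r) t ((pre.length : Int) + 1 + 1) r
        = pvFC t (some x) ((pre.length : Int) + 1 + 1) r := by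
      have key := ih (pre ++ [x])
      simpa [List.getLast?_concat, List.append_assoc, List.length_append,
        Nat.cast_add, Nat.cast_one, add_assoc] using key
    have hiff : (x < t ∧ (((pre.length : Int) + 1 = 1) ∨ pvPrevGE (pre ++ x :: r) ((pre.length : Int) + 1) t = true))
        ↔ (x < t ∧ pvPrevOK pre.getLast? t = true) := and_congr_right (fun _ => hcond)
    simp only [pvAGo, pvFC]
    rw [if_congr hiff rfl hstep]

theorem pvBInner_get (found : PySem.Dict Int Int) (idx x : Int) (prev : Option Int)
    (t : Int) (ht : t = 13000 ∨ t = 8000 ∨ t = 6000) :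
    (pvBInner found idx x prev).get? t =
      if (found.get? t).isNone ∧ x < t ∧ pvPrevOK prev t = true then some idx else found.get? t := by
  rcases ht with rfl | rfl | rfl <;>
    simp only [pvBInner, List.foldl] <;>
    split_ifs <;>
    simp_all [PySem.Dict.get?_insert]

theorem pvPass_get (t : Int) (ht : t = 13000 ∨ t = 8000 ∨ t = 6000) :
    ∀ (rest : List Int) (prev : Option Int) (found : PySem.Dict Int Int) (idx : Int),
    ((rest.foldl (fun (s : Option Int × PySem.Dict Int Int × Int) x =>
        (some x, pvBInner s.2.1 s.2.2 x s.1, s.2.2 + 1)) (prev, found, idx)).2.1).get? t =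
      (found.get? t).or (pvFC t prev idx rest) := by
  intro rest
  induction rest with
  | nil => intro prev found idx; simp [pvFC]
  | cons x r ih =>
    intro prev found idx
    rw [List.foldl_cons]
    rw [ih (some x) (pvBInner found idx x prev) (idx + 1)]
    rw [pvBInner_get found idx x prev t ht]
    cases hf : found.get? t with
    | some v => simp
    | none =>
      simp only [Option.isNone_none, true_and, pvFC, Option.none_or]
      split_ifs <;> simp

-- ===== VERDICT (by name: the statement is the Claim_ definition above) =====
theorem find_milestone_crossings_spec : Claim_equal_find_milestone_crossings := by
  intro xs _
  unfold Spec_find_milestone_crossings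
  have hg : ∀ t ∈ ([13000, 8000, 6000] : List Int),
      ((xs.foldl (fun (s : Option Int × PySem.Dict Int Int × Int) x =>
        (some x, pvBInner s.2.1 s.2.2 x s.1, s.2.2 + 1)) (none, PySem.Dict.empty, 1)).2.1).get? t
      = pvAGo xs t 1 xs := by
    intro t ht
    simp only [List.mem_cons, List.not_mem_nil, or_false] at ht
    rw [pvPass_get t ht xs none PySem.Dict.empty 1]
    have h := pvAGo_eq_fc t xs []
    simp only [List.nil_append, List.length_nil, Nat.cast_zero, zero_add, List.getLast?_nil] at h
    simp [PySem.Dict.get?_empty, h]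
  have halt : find_milestone_crossings_alt xs
      = ([13000, 8000, 6000] : List Int).filterMap (fun t => (pvAGo xs t 1 xs).map (fun i => (t, i))) := by
    simp only [find_milestone_crossings_alt]
    refine List.filterMap_congr ?_
    intro t ht
    rw [hg t ht]
  rw [halt]
  rcases e13 : pvAGo xs 13000 1 xs with _ | i13 <;>
  rcases e8 : pvAGo xs 8000 1 xs with _ | i8 <;>
  rcases e6 : pvAGo xs 6000 1 xs with _ | i6 <;>
    simp [find_milestone_crossings, e13, e8, e6,
      PySem.Dict.insert, PySem.Dict.empty, PySem.Dict.items]
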